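-- pv_equiv track=rewrite | github.com/luiz-surian/miscellaneous | spiral_matrix.py | step1_traverse_matrix
-- ===== SOURCE A (Python) =====
-- def step1_traverse_matrix(matrix):
--     result = []
--     size = len(matrix)
--     x = 0
--     y = 0
--     result.append(matrix[y][x])
--     for _ in range(size-1):
--         x += 1
--         result.append(matrix[y][x])
--     for _ in range(size-1):
--         y += 1
--         result.append(matrix[y][x])
--     for _ in range(size-1):
--         x -= 1
--         result.append(matrix[y][x])
--     for _ in range(size-2):
--         y -= 1
--         result.append(matrix[y][x])
--     return result
-- ===== SOURCE B (Python) =====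
-- def _ring_coord(k, n):
--     # clockwise perimeter position k of an (n+1)x(n+1) matrix, by index arithmetic
--     if k <= n:
--         return (0, k)
--     if k <= 2 * n:
--         return (k - n, n)
--     if k <= 3 * n:
--         return (n, 3 * n - k)
--     return (4 * n - k, 0)
--
--
-- def step1_traverse_matrix(matrix):
--     n = len(matrix) - 1
--     length = 1 if n == 0 else 4 * n
--     result = []
--     for k in range(length):
--         y, x = _ring_coord(k, n)
--         result.append(matrix[y][x])
--     return result
-- ===== Notes on version B (the rewrite author's own statement) =====
-- stated objective: alternative
-- what changed: B replaces A's mutable (x,y) cursor threaded through four sequential direction loops by one loop over the perimeter index k with an arithmetic k->(row,col) mapping (_ring_coord), so no pointer state is carried between iterations.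
import Mathlib
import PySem

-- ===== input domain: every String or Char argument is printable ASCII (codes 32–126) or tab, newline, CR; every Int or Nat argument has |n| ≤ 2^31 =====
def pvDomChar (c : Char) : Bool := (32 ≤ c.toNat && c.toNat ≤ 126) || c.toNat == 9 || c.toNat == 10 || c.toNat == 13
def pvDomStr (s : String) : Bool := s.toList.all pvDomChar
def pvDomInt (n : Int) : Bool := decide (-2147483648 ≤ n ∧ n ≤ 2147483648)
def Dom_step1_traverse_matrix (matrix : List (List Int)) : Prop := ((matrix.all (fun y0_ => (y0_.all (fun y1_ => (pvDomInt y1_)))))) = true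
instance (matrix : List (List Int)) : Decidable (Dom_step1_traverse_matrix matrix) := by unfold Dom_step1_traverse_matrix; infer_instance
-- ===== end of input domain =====

-- B replaces A's mutable (x,y) pointer threaded through four sequential loops by a single loop
-- over the perimeter index k, mapping k to its coordinates arithmetically (alternative, same cost).


-- shared index helper: matrix[y][x]; in-range under Pre_, so the defaults are never read there
def pvAt (matrix : List (List Int)) (y x : Int) : Int :=
  PySem.List.pyGetD (PySem.List.pyGetD matrix y []) x 0

-- ===== PORT A =====
def step1_traverse_matrix (matrix : List (List Int)) : List Int :=
  let size := matrix.length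
  let result : List Int := []
  let x : Int := 0
  let y : Int := 0
  let result := result ++ [pvAt matrix y x]
  -- for _ in range(size-1): x += 1; result.append(matrix[y][x])
  let s1 := (PySem.List.pyRange 0 ((size : Int) - 1) 1).foldl
      (fun (s : Int × List Int) _ => (s.1 + 1, s.2 ++ [pvAt matrix y (s.1 + 1)])) (x, result)
  let x := s1.1
  -- for _ in range(size-1): y += 1; result.append(matrix[y][x])
  let s2 := (PySem.List.pyRange 0 ((size : Int) - 1) 1).foldl
      (fun (s : Int × List Int) _ => (s.1 + 1, s.2 ++ [pvAt matrix (s.1 + 1) x])) (y, s1.2)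
  let y := s2.1
  -- for _ in range(size-1): x -= 1; result.append(matrix[y][x])
  let s3 := (PySem.List.pyRange 0 ((size : Int) - 1) 1).foldl
      (fun (s : Int × List Int) _ => (s.1 - 1, s.2 ++ [pvAt matrix y (s.1 - 1)])) (x, s2.2)
  let x := s3.1
  -- for _ in range(size-2): y -= 1; result.append(matrix[y][x])
  let s4 := (PySem.List.pyRange 0 ((size : Int) - 2) 1).foldl
      (fun (s : Int × List Int) _ => (s.1 - 1, s.2 ++ [pvAt matrix (s.1 - 1) x])) (y, s3.2)
  s4.2

-- ===== PORT B =====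
-- clockwise perimeter position k of an (n+1)x(n+1) matrix, by index arithmetic (Source B's _ring_coord)
def pvRingCoord (k n : Int) : Int × Int :=
  if k ≤ n then (0, k)
  else if k ≤ 2 * n then (k - n, n)
  else if k ≤ 3 * n then (n, 3 * n - k)
  else (4 * n - k, 0)

def step1_traverse_matrix_alt (matrix : List (List Int)) : List Int :=
  let n : Int := (matrix.length : Int) - 1
  let length : Int := if n = 0 then 1 else 4 * n
  (PySem.List.pyRange 0 length 1).foldl
    (fun (result : List Int) k =>
      result ++ [pvAt matrix (pvRingCoord k n).1 (pvRingCoord k n).2]) []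

-- ===== PRECONDITION & SPEC =====
-- Pre_: exactly the inputs on which Python A returns (it indexes columns 0..size-1, so it raises
-- IndexError on the empty matrix and whenever some row is shorter than the number of rows).
def Pre_step1_traverse_matrix (matrix : List (List Int)) : Prop :=
  matrix ≠ [] ∧ ∀ row ∈ matrix, matrix.length ≤ row.length
instance (matrix : List (List Int)) : Decidable (Pre_step1_traverse_matrix matrix) := by
  unfold Pre_step1_traverse_matrix; infer_instance
def pvWitness_step1_traverse_matrix : List (List Int) := [[1, 2], [3, 4]]

def Spec_step1_traverse_matrix (matrix : List (List Int)) (out : List Int) : Prop := out = step1_traverse_matrix_alt matrix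
instance (matrix : List (List Int)) (out : List Int) : Decidable (Spec_step1_traverse_matrix matrix out) := by unfold Spec_step1_traverse_matrix; infer_instance

-- ===== CLAIM (what is proved, stated in full; the proofs are below) =====
def Claim_equal_step1_traverse_matrix : Prop := ∀ (matrix : List (List Int)), Dom_step1_traverse_matrix matrix → Pre_step1_traverse_matrix matrix → Spec_step1_traverse_matrix matrix (step1_traverse_matrix matrix)

-- ===== LEMMAS AND PROOFS =====

-- closed form of A's pointer loops: starting at x0, step d, append f of the moved pointer each time
theorem pvFoldStep (f : Int → Int) (d : Int) (l : List Int) (x0 : Int) (r0 : List Int) :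
    l.foldl (fun (s : Int × List Int) _ => (s.1 + d, s.2 ++ [f (s.1 + d)])) (x0, r0)
    = (x0 + l.length * d,
       r0 ++ (List.range l.length).map (fun (k : Nat) => f (x0 + ((k : Int) + 1) * d))) := by
  induction l generalizing x0 r0 with
  | nil => simp
  | cons a t ih =>
    simp only [List.foldl_cons, ih, List.length_cons, List.range_succ_eq_map, List.map_cons,
      List.map_map, Prod.mk.injEq]
    constructor
    · push_cast; ring
    · simp only [List.append_assoc, List.singleton_append]
      congr 1
      norm_num
      intro k _
      congr 1
      ring

-- the same for A's two decrementing loops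
theorem pvFoldStepDown (f : Int → Int) (l : List Int) (x0 : Int) (r0 : List Int) :
    l.foldl (fun (s : Int × List Int) _ => (s.1 - 1, s.2 ++ [f (s.1 - 1)])) (x0, r0)
    = (x0 - l.length,
       r0 ++ (List.range l.length).map (fun (k : Nat) => f (x0 - ((k : Int) + 1)))) := by
  induction l generalizing x0 r0 with
  | nil => simp
  | cons a t ih =>
    simp only [List.foldl_cons, ih, List.length_cons, List.range_succ_eq_map, List.map_cons,
      List.map_map, Prod.mk.injEq]
    constructor
    · push_cast; ring
    · simp only [List.append_assoc, List.singleton_append]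
      congr 1
      norm_num
      intro k _
      congr 1
      ring

-- instances of the two closed forms for the column loops (y moves, x fixed)
theorem pvFoldStepColUp (m : List (List Int)) (c : Int) (l : List Int) (x0 : Int) (r0 : List Int) :
    l.foldl (fun (s : Int × List Int) _ => (s.1 + 1, s.2 ++ [pvAt m (s.1 + 1) c])) (x0, r0)
    = (x0 + l.length * 1,
       r0 ++ (List.range l.length).map (fun (k : Nat) => pvAt m (x0 + ((k : Int) + 1) * 1) c)) := by
  simpa using pvFoldStep (fun v => pvAt m v c) 1 l x0 r0

theorem pvFoldStepColDown (m : List (List Int)) (c : Int) (l : List Int) (x0 : Int) (r0 : List Int) :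
    l.foldl (fun (s : Int × List Int) _ => (s.1 - 1, s.2 ++ [pvAt m (s.1 - 1) c])) (x0, r0)
    = (x0 - l.length,
       r0 ++ (List.range l.length).map (fun (k : Nat) => pvAt m (x0 - ((k : Int) + 1)) c)) := by
  simpa using pvFoldStepDown (fun v => pvAt m v c) l x0 r0

-- A written as the four ring sides it visits (size = n+1)
theorem pvAClosed (m : List (List Int)) (n : Nat) (h : m.length = n + 1) :
    step1_traverse_matrix m =
      (pvAt m 0 0 :: (List.range n).map (fun (k : Nat) => pvAt m 0 ((k : Int) + 1)))
      ++ (List.range n).map (fun (k : Nat) => pvAt m ((k : Int) + 1) (n : Int))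
      ++ (List.range n).map (fun (k : Nat) => pvAt m (n : Int) ((n : Int) - 1 - (k : Int)))
      ++ (List.range (n - 1)).map (fun (k : Nat) => pvAt m ((n : Int) - 1 - (k : Int)) 0) := by
  unfold step1_traverse_matrix
  rw [h]
  have l1 : (((n + 1 : Nat) : Int) - 1 - 0).toNat = n := by omega
  have l2 : (((n + 1 : Nat) : Int) - 2 - 0).toNat = n - 1 := by omega
  simp only [pvFoldStep, pvFoldStepDown, pvFoldStepColUp, pvFoldStepColDown,
    PySem.List.length_pyRange_one, l1, l2]
  have h1 : (fun (k : Nat) => pvAt m 0 (0 + ((k : Int) + 1) * 1))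
      = (fun (k : Nat) => pvAt m 0 ((k : Int) + 1)) := by
    funext k; congr 1; ring
  have h2 : (fun (k : Nat) => pvAt m (0 + ((k : Int) + 1) * 1) (0 + (n : Int) * 1))
      = (fun (k : Nat) => pvAt m ((k : Int) + 1) (n : Int)) := by
    funext k; congr 1 <;> ring
  have h3 : (fun (k : Nat) => pvAt m (0 + (n : Int) * 1) (0 + (n : Int) * 1 - ((k : Int) + 1)))
      = (fun (k : Nat) => pvAt m (n : Int) ((n : Int) - 1 - (k : Int))) := by
    funext k; congr 1 <;> ring
  have h4 : (fun (k : Nat) => pvAt m (0 + (n : Int) * 1 - ((k : Int) + 1)) (0 + (n : Int) * 1 - (n : Int)))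
      = (fun (k : Nat) => pvAt m ((n : Int) - 1 - (k : Int)) 0) := by
    funext k; congr 1 <;> ring
  simp only [h1, h2, h3, h4, List.cons_append, List.append_assoc, List.nil_append]

-- B's fold is a map over its range
theorem pvFoldAppendMap (g : Int → Int) (l : List Int) (r0 : List Int) :
    l.foldl (fun (result : List Int) k => result ++ [g k]) r0 = r0 ++ l.map g := by
  induction l generalizing r0 with
  | nil => simp
  | cons a t ih => simp [ih]

-- B written in the same normal form (size = n+1)
theorem pvBClosed (m : List (List Int)) (n : Nat) (h : m.length = n + 1) :
    step1_traverse_matrix_alt m =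
      (pvAt m 0 0 :: (List.range n).map (fun (k : Nat) => pvAt m 0 ((k : Int) + 1)))
      ++ (List.range n).map (fun (k : Nat) => pvAt m ((k : Int) + 1) (n : Int))
      ++ (List.range n).map (fun (k : Nat) => pvAt m (n : Int) ((n : Int) - 1 - (k : Int)))
      ++ (List.range (n - 1)).map (fun (k : Nat) => pvAt m ((n : Int) - 1 - (k : Int)) 0) := by
  have hn' : ((n + 1 : Nat) : Int) - 1 = (n : Int) := by push_cast; ring
  have hco : ∀ y1 y2 x1 x2 : Int, y1 = y2 → x1 = x2 → pvAt m y1 x1 = pvAt m y2 x2 := by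
    intro y1 y2 x1 x2 hy hx; rw [hy, hx]
  simp only [step1_traverse_matrix_alt, h, hn', pvFoldAppendMap, List.nil_append]
  rcases Nat.eq_zero_or_pos n with hn | hn
  · subst hn
    norm_num [pvRingCoord, PySem.List.pyRange_one]
  · have hne : (n : Int) ≠ 0 := by omega
    rw [if_neg hne,
      PySem.List.pyRange_one_append 0 ((n : Int) + 1) (4 * n) (by omega) (by omega),
      PySem.List.pyRange_one_append ((n : Int) + 1) (2 * n + 1) (4 * n) (by omega) (by omega),
      PySem.List.pyRange_one_append (2 * (n : Int) + 1) (3 * n + 1) (4 * n) (by omega) (by omega)]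
    simp only [List.map_append]
    have t1 : ((n : Int) + 1 - 0).toNat = n + 1 := by omega
    have t2 : (2 * (n : Int) + 1 - ((n : Int) + 1)).toNat = n := by omega
    have t3 : (3 * (n : Int) + 1 - (2 * (n : Int) + 1)).toNat = n := by omega
    have t4 : (4 * (n : Int) - (3 * (n : Int) + 1)).toNat = n - 1 := by omega
    have s1 : (PySem.List.pyRange 0 ((n : Int) + 1) 1).map
          (fun k => pvAt m (pvRingCoord k n).1 (pvRingCoord k n).2)
        = pvAt m 0 0 :: (List.range n).map (fun (k : Nat) => pvAt m 0 ((k : Int) + 1)) := by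
      rw [PySem.List.pyRange_one, t1, List.map_map, List.range_succ_eq_map, List.map_cons,
        List.map_map]
      congr 1
      · simp [pvRingCoord]
        intro a ha
        simp [ha]
    have s2 : (PySem.List.pyRange ((n : Int) + 1) (2 * n + 1) 1).map
          (fun k => pvAt m (pvRingCoord k n).1 (pvRingCoord k n).2)
        = (List.range n).map (fun (k : Nat) => pvAt m ((k : Int) + 1) (n : Int)) := by
      rw [PySem.List.pyRange_one, t2, List.map_map]
      apply List.map_congr_left
      intro k hk
      rw [List.mem_range] at hk
      simp only [Function.comp_apply, pvRingCoord]
      rw [if_neg (by omega), if_pos (by omega)]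
      exact hco _ _ _ _ (by push_cast; ring) rfl
    have s3 : (PySem.List.pyRange (2 * (n : Int) + 1) (3 * n + 1) 1).map
          (fun k => pvAt m (pvRingCoord k n).1 (pvRingCoord k n).2)
        = (List.range n).map (fun (k : Nat) => pvAt m (n : Int) ((n : Int) - 1 - (k : Int))) := by
      rw [PySem.List.pyRange_one, t3, List.map_map]
      apply List.map_congr_left
      intro k hk
      rw [List.mem_range] at hk
      simp only [Function.comp_apply, pvRingCoord]
      rw [if_neg (by omega), if_neg (by omega),
        if_pos (by omega)]
      exact hco _ _ _ _ rfl (by push_cast; ring)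
    have s4 : (PySem.List.pyRange (3 * (n : Int) + 1) (4 * n) 1).map
          (fun k => pvAt m (pvRingCoord k n).1 (pvRingCoord k n).2)
        = (List.range (n - 1)).map (fun (k : Nat) => pvAt m ((n : Int) - 1 - (k : Int)) 0) := by
      rw [PySem.List.pyRange_one, t4, List.map_map]
      apply List.map_congr_left
      intro k hk
      rw [List.mem_range] at hk
      simp only [Function.comp_apply, pvRingCoord]
      rw [if_neg (by omega), if_neg (by omega),
        if_neg (by omega)]
      exact hco _ _ _ _ (by push_cast; ring) rfl
    rw [s1, s2, s3, s4]
    simp [List.append_assoc]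

-- ===== VERDICT (by name: the statement is the Claim_ definition above) =====
theorem step1_traverse_matrix_spec : Claim_equal_step1_traverse_matrix := by
  intro matrix _ hpre
  obtain ⟨n, hn⟩ : ∃ n, matrix.length = n + 1 := by
    have := List.length_pos_of_ne_nil hpre.1
    exact ⟨matrix.length - 1, by omega⟩
  unfold Spec_step1_traverse_matrix
  rw [pvAClosed matrix n hn, pvBClosed matrix n hn]
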